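-- pv_equiv track=rewrite | github.com/azefzafyoussef/personnalWebsite | resources/views/client/posts/php/test2.py | recc
-- ===== SOURCE A (Python) =====
-- def  recc(a):
--     pos=alphabet.index(a[0])
--     is_rec = True
--     for i in a:
--         pos1 = alphabet.index(i)
--         if pos1 > pos :
--             is_rec= False
--             break;
--         pos = pos1
--     return is_rec
--
-- alphabet = ["a","b","c","d","e","f","g","h","i","j","k","l","m","n","o","p","q","r","s","t","u","v","w","x","y","z"]
-- ===== SOURCE B (Python) =====
-- def recc(a):
--     return a == sorted(a, key=alphabet.index, reverse=True)
--
-- alphabet = ["a","b","c","d","e","f","g","h","i","j","k","l","m","n","o","p","q","r","s","t","u","v","w","x","y","z"]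
-- ===== Notes on version B (the rewrite author's own statement) =====
-- stated objective: simpler
-- what changed: B checks non-increasing order by stably sorting the list descending by alphabet position and comparing with the original, instead of A's scan carrying a running previous position with an early break; B returns True on the empty list where A raises IndexError.
-- outside the precondition, e.g. on recc(['b', 'c', '!']): A returns False, B raises ValueError
import Mathlib
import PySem

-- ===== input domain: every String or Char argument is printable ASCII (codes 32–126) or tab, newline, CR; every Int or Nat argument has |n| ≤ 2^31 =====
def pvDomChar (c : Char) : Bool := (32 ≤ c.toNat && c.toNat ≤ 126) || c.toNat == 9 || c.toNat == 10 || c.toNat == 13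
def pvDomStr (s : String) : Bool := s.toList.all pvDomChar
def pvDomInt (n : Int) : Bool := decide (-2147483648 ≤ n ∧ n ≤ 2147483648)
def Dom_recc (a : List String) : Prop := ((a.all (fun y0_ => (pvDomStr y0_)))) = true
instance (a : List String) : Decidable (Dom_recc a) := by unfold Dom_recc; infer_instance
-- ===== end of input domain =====

-- B decides "non-increasing" by stably sorting descending by alphabet position and comparing
-- with the input, instead of A's scan with a carried previous position and an early break;
-- return-value equivalence on Pre_ (B returns True on [] where A raises IndexError).

def pvAlphabet : List String :=
  ["a","b","c","d","e","f","g","h","i","j","k","l","m","n","o","p","q","r","s","t","u","v","w","x","y","z"]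

-- ===== PORT A =====
-- A's for-loop with break, as structural recursion on the list carrying `pos`
def reccLoop (l : List String) (pos : Nat) : Bool :=
  match l with
  | [] => true
  | i :: rest =>
    match PySem.List.index? pvAlphabet i with
    | none => true   -- ValueError; excluded by Pre_recc
    | some pos1 => if pos1 > pos then false else reccLoop rest pos1

def recc (a : List String) : Bool :=
  match PySem.List.pyGet? a 0 with
  | none => true   -- IndexError on a[0]; excluded by Pre_recc
  | some h =>
    match PySem.List.index? pvAlphabet h with
    | none => true   -- ValueError; excluded by Pre_recc
    | some pos => reccLoop a pos

-- ===== PORT B =====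
-- the sort key alphabet.index; total stand-in (the `none` case is excluded by Pre_recc)
def pvKey (s : String) : Nat := (PySem.List.index? pvAlphabet s).getD 0

def recc_alt (a : List String) : Bool :=
  if a.all (fun s => (PySem.List.index? pvAlphabet s).isSome) then
    a == PySem.List.sorted a pvKey true
  else true   -- ValueError raised by the key function; excluded by Pre_recc

-- ===== PRECONDITION & SPEC =====
-- Pre_ excludes the empty list (A raises IndexError on a[0]) and lists containing a string that is
-- not a single lowercase letter: A usually raises ValueError there, but can return False when its
-- early break fires before reaching the bad element, while B's sort key always raises.
def Pre_recc (a : List String) : Prop := a ≠ [] ∧ ∀ s ∈ a, s ∈ pvAlphabet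
instance (a : List String) : Decidable (Pre_recc a) := by unfold Pre_recc; infer_instance
def pvWitness_recc : List String := ["c", "b", "b", "a"]

def Spec_recc (a : List String) (out : Bool) : Prop := out = recc_alt a
instance (a : List String) (out : Bool) : Decidable (Spec_recc a out) := by unfold Spec_recc; infer_instance

-- ===== CLAIM =====
def Claim_equal_recc : Prop := ∀ (a : List String), Dom_recc a → Pre_recc a → Spec_recc a (recc a)

-- ===== LEMMAS AND PROOFS =====

lemma index?_eq_pvKey {s : String} (h : s ∈ pvAlphabet) :
    PySem.List.index? pvAlphabet s = some (pvKey s) := by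
  have hs := (PySem.List.index?_isSome_iff (xs := pvAlphabet) (v := s)).mpr h
  unfold pvKey
  cases hx : PySem.List.index? pvAlphabet s with
  | none => rw [hx] at hs; simp at hs
  | some k => simp only [Option.getD_some]

-- A's loop decides the adjacent non-increasing chain starting from `pos`
lemma loop_eq_chain (l : List String) (pos : Nat) (h : ∀ s ∈ l, s ∈ pvAlphabet) :
    reccLoop l pos = decide (List.IsChain (fun x y : Nat => y ≤ x) (pos :: l.map pvKey)) := by
  induction l generalizing pos with
  | nil => simp [reccLoop]
  | cons x xs ih =>
    rw [reccLoop, index?_eq_pvKey (h x (by simp))]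
    simp only [List.map_cons, List.isChain_cons_cons]
    rw [ih (pvKey x) (fun s hs => h s (by simp [hs]))]
    by_cases hc : pvKey x > pos
    · simp [hc, Nat.not_le.mpr hc]
    · simp [hc, Nat.le_of_not_lt hc]

-- ===== VERDICT =====
theorem recc_spec : Claim_equal_recc := by
  intro a _ hpre
  obtain ⟨hne, hall⟩ := hpre
  obtain ⟨h, t, rfl⟩ := List.exists_cons_of_ne_nil hne
  have hh : h ∈ pvAlphabet := hall h (by simp)
  have hg : PySem.List.pyGet? (h :: t) (0 : Int) = some h := by
    simp [PySem.List.pyGet?, PySem.List.pyIdx?]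
  have hsome : (h :: t).all (fun s => (PySem.List.index? pvAlphabet s).isSome) = true := by
    simp only [List.all_eq_true]
    intro s hs
    rw [index?_eq_pvKey (hall s hs)]; rfl
  unfold Spec_recc recc recc_alt
  rw [hg]
  dsimp only
  rw [index?_eq_pvKey hh, hsome]
  dsimp only
  rw [loop_eq_chain _ _ hall]
  -- the loop's chain starts with a duplicated head (pos = pvKey h), so it holds exactly
  -- when (h :: t) is pairwise non-increasing by key; sorting descending fixes the list
  -- iff that holds.
  haveI : Trans (fun x y : String => pvKey y ≤ pvKey x)
      (fun x y : String => pvKey y ≤ pvKey x) (fun x y : String => pvKey y ≤ pvKey x) :=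
    ⟨fun hab hbc => le_trans hbc hab⟩
  have hchain : List.IsChain (fun x y : Nat => y ≤ x) (pvKey h :: (h :: t).map pvKey)
      ↔ (h :: t).Pairwise (fun x y => pvKey y ≤ pvKey x) := by
    rw [List.map_cons, List.isChain_cons_cons, ← List.map_cons,
        List.isChain_map, List.isChain_iff_pairwise]
    exact ⟨fun hc => hc.2, fun hp => ⟨le_refl _, hp⟩⟩
  by_cases hp : (h :: t).Pairwise (fun x y => pvKey y ≤ pvKey x)
  · rw [PySem.List.sorted_rev_eq_self_of_pairwise _ _ hp]
    simp only [if_true, beq_self_eq_true]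
    exact decide_eq_true (hchain.mpr hp)
  · have hne2 : (h :: t) ≠ PySem.List.sorted (h :: t) pvKey true := by
      intro heq
      have hps := PySem.List.sorted_pairwise_rev (h :: t) pvKey
      rw [← heq] at hps
      exact hp hps
    rw [decide_eq_false (fun hc => hp (hchain.mp hc))]
    simp only [if_true]
    exact (beq_eq_false_iff_ne.mpr hne2).symm
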